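-- pv_equiv track=rewrite | github.com/EspenAlbert/atlas-init | py/atlas_init/cli_tf/schema_v2.py | import_lines
-- ===== SOURCE A (Python) =====
-- INDENT = "  "
--
-- def indent(level: int, line: str) -> str:
--     return INDENT * level + line
--
-- def import_lines(import_urls: set[str]) -> list[str]:
--     stdlib_imports = {url for url in import_urls if "." not in url}
--     pkg_imports = import_urls - stdlib_imports
--     imports = sorted(stdlib_imports)
--     if imports:
--         imports.append("")
--     imports.extend(sorted(pkg_imports))
--     return [
--         "import (",
--         *[indent(1, f'"{url}"') if url else "" for url in imports],
--         ")",
--         "",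
--     ]
-- ===== SOURCE B (Python) =====
-- def import_lines(import_urls: set[str]) -> list[str]:
--     out = ["import ("]
--     prev_stdlib = False
--     for url in sorted(import_urls, key=lambda u: ("\x01" if "." in u else "\x00") + u):
--         if prev_stdlib and "." in url:
--             out.append("")
--         out.append(f'  "{url}"' if url else "")
--         prev_stdlib = "." not in url
--     if prev_stdlib:
--         out.append("")
--     out += [")", ""]
--     return out
-- ===== Notes on version B (the rewrite author's own statement) =====
-- stated objective: alternative
-- what changed: B makes one sort of all urls under a group-encoding string key (stdlib before package) and emits the block in a single streaming pass with a prev-group flag that injects the blank separator on the group transition and after a trailing stdlib group, instead of A's set partition, set difference, two separate sorts, conditional append and list concatenation; Pre_ only states the list holds distinct elements, i.e. it represents the set-typed parameter.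
import Mathlib
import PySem

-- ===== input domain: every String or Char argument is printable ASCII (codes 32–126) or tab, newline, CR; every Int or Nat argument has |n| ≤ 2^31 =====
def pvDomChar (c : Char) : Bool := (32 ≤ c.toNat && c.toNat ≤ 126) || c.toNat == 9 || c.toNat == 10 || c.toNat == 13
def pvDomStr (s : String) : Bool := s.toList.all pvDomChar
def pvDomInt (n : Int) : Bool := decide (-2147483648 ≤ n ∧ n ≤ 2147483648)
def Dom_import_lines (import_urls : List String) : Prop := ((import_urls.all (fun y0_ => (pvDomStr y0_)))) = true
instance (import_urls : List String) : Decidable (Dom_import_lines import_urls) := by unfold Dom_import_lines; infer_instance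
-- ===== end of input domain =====

-- B builds the block in one streaming pass over a single sort under a group-encoding key
-- (separator injected at the group transition), instead of A's set partition, set
-- difference and two separate sorts (objective: alternative).

-- ===== PORT A =====
-- indent(level, line) = "  " * level + line
def pvIndent (level : Int) (line : String) : String :=
  String.ofList (PySem.List.pyRepeat "  ".toList level) ++ line

def import_lines (import_urls : List String) : List String :=
  let stdlib_imports : PySem.Set String :=
    PySem.Set.ofList (import_urls.filter (fun url => !(PySem.Str.isIn "." url)))
  let pkg_imports : PySem.Set String := PySem.Set.diff import_urls stdlib_imports
  let imports0 := PySem.List.sorted stdlib_imports (fun u => u.toList)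
  let imports1 := if imports0 ≠ [] then imports0 ++ [""] else imports0
  let imports := imports1 ++ PySem.List.sorted pkg_imports (fun u => u.toList)
  "import (" ::
    (imports.map (fun url => if url ≠ "" then pvIndent 1 ("\"" ++ (url ++ "\"")) else "")) ++
    [")", ""]

-- ===== PORT B =====
-- the key ("\x01" if "." in u else "\x00") + u, ported over List Char (same lexicographic order)
def pvKey (u : String) : List Char :=
  (if PySem.Str.isIn "." u then '\x01' else '\x00') :: u.toList

def pvStep (st : List String × Bool) (url : String) : List String × Bool :=
  ((if st.2 && PySem.Str.isIn "." url then st.1 ++ [""] else st.1) ++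
      [if url ≠ "" then "  \"" ++ url ++ "\"" else ""],
   !(PySem.Str.isIn "." url))

def import_lines_alt (import_urls : List String) : List String :=
  let st := (PySem.List.sorted import_urls pvKey).foldl pvStep (["import ("], false)
  (if st.2 then st.1 ++ [""] else st.1) ++ [")", ""]

-- ===== PRECONDITION & SPEC =====
-- Pre_: the parameter is a Python set, so the list holds distinct elements.
def Pre_import_lines (import_urls : List String) : Prop := import_urls.Nodup
instance (import_urls : List String) : Decidable (Pre_import_lines import_urls) := by
  unfold Pre_import_lines; infer_instance
def pvWitness_import_lines : List String := ["fmt", "example.com/pkg"]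

def Spec_import_lines (import_urls : List String) (out : List String) : Prop :=
  out = import_lines_alt import_urls
instance (import_urls : List String) (out : List String) : Decidable (Spec_import_lines import_urls out) := by
  unfold Spec_import_lines; infer_instance

-- ===== CLAIM (what is proved, stated in full; the proofs are below) =====
def Claim_equal_import_lines : Prop := ∀ (import_urls : List String), Dom_import_lines import_urls → Pre_import_lines import_urls → Spec_import_lines import_urls (import_lines import_urls)

-- ===== LEMMAS AND PROOFS =====

-- A's set difference over the no-dot filter is the has-dot filter
theorem pvDiff_filter (xs : List String) :
    PySem.Set.diff xs (xs.filter (fun u => !(PySem.Str.isIn "." u)))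
      = xs.filter (fun u => PySem.Str.isIn "." u) := by
  show List.filter _ xs = _
  apply List.filter_congr
  intro u hu
  simp at *
  cases h : PySem.Str.isIn "." u <;> simp [hu]

-- the two PySem.List.sorted instance paths (port's structural LT vs LinearOrder) coincide
theorem pvSorted_inst (ys : List String) (k : String → List Char) :
    PySem.List.sorted ys k
      = @PySem.List.sorted String (List Char) List.instLT
          (@LinearOrder.toDecidableLT _ List.instLinearOrder) ys k false := by
  congr 1

-- a sort of a duplicate-free list is strictly increasing
theorem pvSorted_pairwise_lt (xs : List String) (h : xs.Nodup) :
    (PySem.List.sorted xs (fun u => u.toList)).Pairwise (fun a b => a.toList < b.toList) := by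
  rw [pvSorted_inst]
  have hperm := PySem.List.sorted_perm (κ := List Char) xs (fun u => u.toList) false
  rw [pvSorted_inst] at hperm
  have hnd : (@PySem.List.sorted String (List Char) List.instLT
      (@LinearOrder.toDecidableLT _ List.instLinearOrder) xs (fun u => u.toList) false).Nodup :=
    hperm.nodup_iff.mpr h
  have hle := PySem.List.sorted_pairwise (κ := List Char) xs (fun u => u.toList)
  refine List.Pairwise.imp₂ ?_ hle hnd
  intro a b hab hne
  exact lt_of_le_of_ne hab (fun hc => hne (by
    have := congrArg String.ofList hc; simpa using this))

-- B's single sort under the tagged key is A's two sorted groups concatenated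
theorem pvSortedKey_split (xs : List String) (h : xs.Nodup) :
    PySem.List.sorted xs pvKey
      = PySem.List.sorted (xs.filter (fun u => !(PySem.Str.isIn "." u))) (fun u => u.toList)
        ++ PySem.List.sorted (xs.filter (fun u => PySem.Str.isIn "." u)) (fun u => u.toList) := by
  have hmf : ∀ a ∈ PySem.List.sorted (xs.filter (fun u => !(PySem.Str.isIn "." u)))
      (fun u => u.toList), PySem.Chars.isIn ['.'] a.toList = false := by
    intro a ha
    simpa using (List.mem_filter.mp ((PySem.List.mem_sorted _ _ _ _).mp ha)).2
  have hmp : ∀ a ∈ PySem.List.sorted (xs.filter (fun u => PySem.Str.isIn "." u))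
      (fun u => u.toList), PySem.Chars.isIn ['.'] a.toList = true := by
    intro a ha
    simpa using (List.mem_filter.mp ((PySem.List.mem_sorted _ _ _ _).mp ha)).2
  rw [pvSorted_inst] at hmf
  rw [pvSorted_inst] at hmp
  rw [pvSorted_inst xs pvKey, pvSorted_inst, pvSorted_inst]
  apply PySem.List.sorted_eq_of_perm_of_pairwise_lt
  · -- permutation
    have h1 := @PySem.List.sorted_perm String (List Char) List.instLT
      (@LinearOrder.toDecidableLT _ List.instLinearOrder)
      (xs.filter (fun u => !(PySem.Str.isIn "." u))) (fun u => u.toList) false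
    have h2 := @PySem.List.sorted_perm String (List Char) List.instLT
      (@LinearOrder.toDecidableLT _ List.instLinearOrder)
      (xs.filter (fun u => PySem.Str.isIn "." u)) (fun u => u.toList) false
    refine (h1.append h2).trans ?_
    have := List.filter_append_perm (fun u => !(PySem.Str.isIn "." u)) xs
    simpa using this
  · -- strictly increasing under pvKey
    have hsf := pvSorted_pairwise_lt _ (h.filter (fun u => !(PySem.Str.isIn "." u)))
    have hsp := pvSorted_pairwise_lt _ (h.filter (fun u => PySem.Str.isIn "." u))
    rw [pvSorted_inst] at hsf hsp
    apply List.pairwise_append.mpr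
    refine ⟨?_, ?_, ?_⟩
    · refine hsf.imp_of_mem ?_
      intro a b ha hb hab
      simpa [pvKey, hmf a ha, hmf b hb] using hab
    · refine hsp.imp_of_mem ?_
      intro a b ha hb hab
      simpa [pvKey, hmp a ha, hmp b hb] using hab
    · intro a ha b hb
      simp [pvKey, hmf a ha, hmp b hb]
      exact List.Lex.rel (by decide)

def pvG (url : String) : String := if url ≠ "" then "  \"" ++ url ++ "\"" else ""

-- the streaming fold over a dotless group: no separator, flag becomes true
theorem pvFold_nodot (l : List String) (acc : List String) (p : Bool)
    (h : ∀ u ∈ l, PySem.Str.isIn "." u = false) :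
    l.foldl pvStep (acc, p) = (acc ++ l.map pvG, if l = [] then p else true) := by
  induction l generalizing acc p with
  | nil => simp
  | cons u t ih =>
    have hu : PySem.Chars.isIn ['.'] u.toList = false := by simpa using h u (by simp)
    have hstep : pvStep (acc, p) u = (acc ++ [pvG u], true) := by
      simp [pvStep, pvG, hu]
    rw [List.foldl_cons, hstep, ih _ _ (fun v hv => h v (by simp [hv]))]
    cases t <;> simp

-- the streaming fold over a dotted group with the flag down: no separator, flag stays down
theorem pvFold_dot_false (l : List String) (acc : List String)
    (h : ∀ u ∈ l, PySem.Str.isIn "." u = true) :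
    l.foldl pvStep (acc, false) = (acc ++ l.map pvG, false) := by
  induction l generalizing acc with
  | nil => simp
  | cons u t ih =>
    have hu : PySem.Chars.isIn ['.'] u.toList = true := by simpa using h u (by simp)
    have hstep : pvStep (acc, false) u = (acc ++ [pvG u], false) := by
      simp [pvStep, pvG, hu]
    rw [List.foldl_cons, hstep, ih _ (fun v hv => h v (by simp [hv]))]
    simp

-- with the flag up, a nonempty dotted group first emits the separator
theorem pvFold_dot_true (l : List String) (acc : List String) (hne : l ≠ [])
    (h : ∀ u ∈ l, PySem.Str.isIn "." u = true) :
    l.foldl pvStep (acc, true) = (acc ++ "" :: l.map pvG, false) := by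
  cases l with
  | nil => exact absurd rfl hne
  | cons u t =>
    have hu : PySem.Chars.isIn ['.'] u.toList = true := by simpa using h u (by simp)
    have hstep : pvStep (acc, true) u = ((acc ++ [""]) ++ [pvG u], false) := by
      simp [pvStep, pvG, hu]
    rw [List.foldl_cons, hstep, pvFold_dot_false _ _ (fun v hv => h v (by simp [hv]))]
    simp

-- A's block over two groups equals B's streaming fold over their concatenation
theorem pvCombine (sf sp : List String)
    (hsf : ∀ u ∈ sf, PySem.Str.isIn "." u = false)
    (hsp : ∀ u ∈ sp, PySem.Str.isIn "." u = true) :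
    "import (" :: (((if sf ≠ [] then sf ++ [""] else sf) ++ sp).map pvG) ++ [")", ""]
      = (if ((sf ++ sp).foldl pvStep (["import ("], false)).2
           then ((sf ++ sp).foldl pvStep (["import ("], false)).1 ++ [""]
           else ((sf ++ sp).foldl pvStep (["import ("], false)).1) ++ [")", ""] := by
  rw [List.foldl_append, pvFold_nodot sf _ _ hsf]
  by_cases h0 : sf = []
  · subst h0
    rw [if_pos rfl, pvFold_dot_false sp _ hsp]
    simp
  · rw [if_neg h0, if_pos h0]
    by_cases h1 : sp = []
    · subst h1
      simp [pvG]
    · rw [pvFold_dot_true sp _ h1 hsp]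
      simp [pvG]

-- ===== VERDICT (by name: the statement is the Claim_ definition above) =====
theorem import_lines_spec : Claim_equal_import_lines := by
  intro xs _ hpre
  show import_lines xs = import_lines_alt xs
  simp only [import_lines, import_lines_alt]
  rw [PySem.Set.ofList_eq_self_of_nodup _ (hpre.filter _), pvDiff_filter,
      pvSortedKey_split xs hpre]
  have hfun : (fun url => if url ≠ "" then pvIndent 1 ("\"" ++ (url ++ "\"")) else "") = pvG := by
    funext u
    by_cases h : u = "" <;> simp [pvG, h]
    rfl
  rw [hfun]
  exact pvCombine _ _
    (fun u hu => by
      simpa using (List.mem_filter.mp ((PySem.List.mem_sorted _ _ _ _).mp hu)).2)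
    (fun u hu => (List.mem_filter.mp ((PySem.List.mem_sorted _ _ _ _).mp hu)).2)
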